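-- pv_equiv track=rewrite | github.com/poluzerovT/mms-12-2025 | Voronenko/lab3/main.py | get_dominant_series_length
-- ===== SOURCE A (Python) =====
-- from typing import List, Tuple, Dict, Callable, Any
--
-- def get_dominant_series_length(scores_a: List[int], scores_b: List[int]) -> int:
--     max_series = 0
--     current_series = 0
--
--     for score_a, score_b in zip(scores_a, scores_b):
--         if (score_a == 5 and score_b == 0) or (score_a == 0 and score_b == 5):
--             current_series += 1
--             max_series = max(max_series, current_series)
--         else:
--             current_series = 0
--
--     return max_series
-- ===== SOURCE B (Python) =====
-- def get_dominant_series_length(scores_a, scores_b):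
--     # Run-length encode the dominant flags (current run kept at the front),
--     # then take the maximum length among the True runs.
--     runs = []  # list of [flag, count], most recent run first
--     for a, b in zip(scores_a, scores_b):
--         f = (a == 5 and b == 0) or (a == 0 and b == 5)
--         if runs and runs[0][0] == f:
--             runs[0][1] += 1
--         else:
--             runs.insert(0, [f, 1])
--     return max((n for f, n in runs if f), default=0)
-- ===== Notes on version B (the rewrite author's own statement) =====
-- stated objective: alternative
-- what changed: B run-length-encodes the sequence of dominant flags into groups and then takes the maximum length among the True groups, instead of A's single pass maintaining current/max streak counters.
import Mathlib
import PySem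

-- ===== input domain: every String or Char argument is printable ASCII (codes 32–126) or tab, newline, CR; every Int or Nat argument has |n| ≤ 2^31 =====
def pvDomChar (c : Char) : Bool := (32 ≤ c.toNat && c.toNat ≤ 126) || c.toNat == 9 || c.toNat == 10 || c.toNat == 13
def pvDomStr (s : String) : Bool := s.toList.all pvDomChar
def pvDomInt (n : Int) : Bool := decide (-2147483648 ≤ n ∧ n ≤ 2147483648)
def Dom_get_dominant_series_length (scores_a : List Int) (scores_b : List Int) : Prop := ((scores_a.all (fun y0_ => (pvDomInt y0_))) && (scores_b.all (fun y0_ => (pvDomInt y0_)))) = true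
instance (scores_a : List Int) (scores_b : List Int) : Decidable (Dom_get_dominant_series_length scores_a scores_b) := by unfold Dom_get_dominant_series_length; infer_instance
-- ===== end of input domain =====

-- B replaces A's current/max streak counters by run-length encoding the dominant
-- flags and taking the maximum True-run length (objective: alternative).


-- ===== PORT A =====
-- A's loop over zip(scores_a, scores_b) with state (max_series, current_series)
def get_dominant_series_length (scores_a : List Int) (scores_b : List Int) : Int :=
  (List.foldl
    (fun (st : Int × Int) (p : Int × Int) =>
      if (p.1 = 5 ∧ p.2 = 0) ∨ (p.1 = 0 ∧ p.2 = 5) then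
        (max st.1 (st.2 + 1), st.2 + 1)
      else
        (st.1, 0))
    (0, 0) (scores_a.zip scores_b)).1

-- ===== PORT B =====
-- one step of B's run-length encoding: current run at the front of the list
def pvRunStep (acc : List (Bool × Int)) (f : Bool) : List (Bool × Int) :=
  match acc with
  | [] => [(f, 1)]
  | (k, n) :: rest => if k = f then (k, n + 1) :: rest else (f, 1) :: (k, n) :: rest

def get_dominant_series_length_alt (scores_a : List Int) (scores_b : List Int) : Int :=
  let runs := List.foldl
    (fun acc (p : Int × Int) =>
      pvRunStep acc ((p.1 == 5 && p.2 == 0) || (p.1 == 0 && p.2 == 5)))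
    [] (scores_a.zip scores_b)
  (runs.filter (fun r => r.1)).foldl (fun m r => max m r.2) 0

-- ===== PRECONDITION & SPEC =====
def Spec_get_dominant_series_length (scores_a : List Int) (scores_b : List Int) (out : Int) : Prop := out = get_dominant_series_length_alt scores_a scores_b
instance (scores_a : List Int) (scores_b : List Int) (out : Int) : Decidable (Spec_get_dominant_series_length scores_a scores_b out) := by unfold Spec_get_dominant_series_length; infer_instance

-- ===== CLAIM (what is proved, stated in full; the proofs are below) =====
def Claim_equal_get_dominant_series_length : Prop := ∀ (scores_a : List Int) (scores_b : List Int), Dom_get_dominant_series_length scores_a scores_b → Spec_get_dominant_series_length scores_a scores_b (get_dominant_series_length scores_a scores_b)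

-- ===== LEMMAS AND PROOFS =====

-- maximum True-run length recorded in an RLE accumulator
def pvMaxRun (acc : List (Bool × Int)) : Int :=
  (acc.filter (fun r => r.1)).foldl (fun m r => max m r.2) 0

-- length of the current (front) True run
def pvCurRun (acc : List (Bool × Int)) : Int :=
  match acc with
  | (true, n) :: _ => n
  | _ => 0

theorem pv_foldl_max_comm (l : List (Bool × Int)) (a b : Int) :
    l.foldl (fun m r => max m r.2) (max a b) = max a (l.foldl (fun m r => max m r.2) b) := by
  induction l generalizing b with
  | nil => simp
  | cons p t ih =>
    simp only [List.foldl_cons]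
    rw [max_assoc, ih]

theorem pv_maxRun_cons_true (n : Int) (rest : List (Bool × Int)) :
    pvMaxRun ((true, n) :: rest) = max (max 0 n) (pvMaxRun rest) := by
  simp only [pvMaxRun, List.filter_cons, decide_true, if_true, List.foldl_cons]
  have h := pv_foldl_max_comm (rest.filter (fun r => r.1)) (max 0 n) 0
  rwa [max_eq_left (le_max_left 0 n)] at h

theorem pv_maxRun_cons_false (n : Int) (rest : List (Bool × Int)) :
    pvMaxRun ((false, n) :: rest) = pvMaxRun rest := by
  simp [pvMaxRun]

-- loop invariant: A's (max, cur) state is mirrored by B's RLE accumulator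
theorem pv_inv (l : List (Int × Int)) (acc : List (Bool × Int)) (m c : Int)
    (hc : 0 ≤ c) (hm : pvMaxRun acc = m) (hcur : pvCurRun acc = c) :
    (List.foldl
      (fun (st : Int × Int) (p : Int × Int) =>
        if (p.1 = 5 ∧ p.2 = 0) ∨ (p.1 = 0 ∧ p.2 = 5) then
          (max st.1 (st.2 + 1), st.2 + 1)
        else
          (st.1, 0))
      (m, c) l).1
    = pvMaxRun (List.foldl
        (fun acc (p : Int × Int) =>
          pvRunStep acc ((p.1 == 5 && p.2 == 0) || (p.1 == 0 && p.2 == 5)))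
        acc l) := by
  induction l generalizing acc m c with
  | nil => simpa using hm.symm
  | cons p t ih =>
    simp only [List.foldl_cons]
    by_cases hp : (p.1 = 5 ∧ p.2 = 0) ∨ (p.1 = 0 ∧ p.2 = 5)
    · have hf : ((p.1 == 5 && p.2 == 0) || (p.1 == 0 && p.2 == 5)) = true := by
        rcases hp with ⟨h1, h2⟩ | ⟨h1, h2⟩ <;> simp [h1, h2]
      rw [if_pos hp, hf]
      rcases acc with _ | ⟨⟨kb, n⟩, rest⟩
      · have hm0 : m = 0 := by simpa [pvMaxRun] using hm.symm
        have hc0 : c = 0 := by simpa [pvCurRun] using hcur.symm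
        subst hm0; subst hc0
        exact ih [(true, 1)] (max 0 1) 1 (by omega)
          (by rw [pv_maxRun_cons_true]; simp [pvMaxRun]) (by simp [pvCurRun])
      · cases kb
        · have hc0 : c = 0 := by simpa [pvCurRun] using hcur.symm
          subst hc0
          simp only [pvRunStep, if_neg (by decide : ¬(false = true))]
          refine ih ((true, 1) :: (false, n) :: rest) (max m 1) 1 (by omega) ?_
            (by simp [pvCurRun])
          rw [pv_maxRun_cons_true, pv_maxRun_cons_false]
          rw [pv_maxRun_cons_false] at hm
          omega
        · have hn : n = c := by simpa [pvCurRun] using hcur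
          subst hn
          simp only [pvRunStep]
          refine ih ((true, n + 1) :: rest) (max m (n + 1)) (n + 1) (by omega) ?_
            (by simp [pvCurRun])
          rw [pv_maxRun_cons_true]
          rw [pv_maxRun_cons_true] at hm
          omega
    · have hf : ((p.1 == 5 && p.2 == 0) || (p.1 == 0 && p.2 == 5)) = false := by
        rcases p with ⟨x, y⟩
        simp only [not_or, not_and] at hp
        by_cases h1 : x = 5 <;> by_cases h2 : y = 0 <;> by_cases h3 : x = 0 <;>
          by_cases h4 : y = 5 <;> simp_all
      rw [if_neg hp, hf]
      rcases acc with _ | ⟨⟨kb, n⟩, rest⟩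
      · have hm0 : m = 0 := by simpa [pvMaxRun] using hm.symm
        subst hm0
        simp only [pvRunStep]
        exact ih [(false, 1)] 0 0 le_rfl (by rw [pv_maxRun_cons_false]; rfl)
          (by simp [pvCurRun])
      · cases kb
        · simp only [pvRunStep]
          refine ih ((false, n + 1) :: rest) m 0 le_rfl ?_ (by simp [pvCurRun])
          rw [pv_maxRun_cons_false]
          rw [pv_maxRun_cons_false] at hm
          exact hm
        · simp only [pvRunStep, if_neg (by decide : ¬(true = false))]
          exact ih ((false, 1) :: (true, n) :: rest) m 0 le_rfl
            (by rw [pv_maxRun_cons_false]; exact hm) (by simp [pvCurRun])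

-- ===== VERDICT (by name: the statement is the Claim_ definition above) =====
theorem get_dominant_series_length_spec : Claim_equal_get_dominant_series_length := by
  intro scores_a scores_b _
  unfold Spec_get_dominant_series_length get_dominant_series_length get_dominant_series_length_alt
  exact pv_inv (scores_a.zip scores_b) [] 0 0 le_rfl rfl rfl
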